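-- pv_equiv track=rewrite | github.com/nlemoing/generalized-knight | python/knight.py | search
-- ===== SOURCE A (Python) =====
-- from collections import deque
--
-- def new_board(n):
--     return [[0 for _ in range(n)] for _ in range (n)]
--
-- def all_moves(k):
--     x, y = k
--     moves = [(x, y), (-1 * x, y), (x, -1 * y), (-1 * x, -1 * y)]
--     return moves + [(y, x) for x, y in moves]
--
-- def move_valid(n):
--     def valid(m):
--         x, y = m
--         return (x >= 0 and x < n and y >= 0 and y < n)
--     return valid
--
-- def make_move(s, m):
--     return (s[0] + m[0], s[1] + m[1])
--
-- def search(n, k = (2, 1)):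
--     board = new_board(n)
--     moves = all_moves(k)
--     valid = move_valid(n)
--     q = deque()
--     c = (n-1)//2
--     board[c][c] = 1
--     q.append((c, c))
--     while q:
--         x, y = q.popleft()
--         i = board[y][x]
--         next_moves = [make_move((x, y), m) for m in moves]
--         next_moves = [m for m in next_moves if valid(m)]
--         for nx, ny in next_moves:
--             if board[ny][nx]:
--                 continue
--             board[ny][nx] = i + 1
--             q.append((nx, ny))
--     return board
-- ===== SOURCE B (Python) =====
-- def search(n, k=(2, 1)):
--     kx, ky = k
--     base = [(kx, ky), (-kx, ky), (kx, -ky), (-kx, -ky)]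
--     moves = base + [(y, x) for x, y in base]
--     board = [[0] * n for _ in range(n)]
--     c = (n - 1) // 2
--     board[c][c] = 1
--     changed = True
--     while changed:
--         changed = False
--         new = []
--         for y in range(n):
--             row = []
--             for x in range(n):
--                 v = board[y][x]
--                 if v == 0:
--                     nbrs = [board[y + dy][x + dx] for dx, dy in moves
--                             if 0 <= x + dx < n and 0 <= y + dy < n
--                             and board[y + dy][x + dx]]
--                     if nbrs:
--                         v = min(nbrs) + 1
--                         changed = True
--                 row.append(v)
--             new.append(row)
--         board = new
--     return board
-- ===== Notes on version B (the rewrite author's own statement) =====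
-- stated objective: alternative
-- what changed: Replaces the deque BFS with a queue-free fixpoint relaxation (distance-transform style): starting from the seeded center, the whole board is repeatedly swept synchronously, each still-zero cell reading its own in-bounds neighbors and becoming 1 + min of their nonzero values, until a sweep changes nothing; no queue, no frontier, no per-node pops.
import Mathlib
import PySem

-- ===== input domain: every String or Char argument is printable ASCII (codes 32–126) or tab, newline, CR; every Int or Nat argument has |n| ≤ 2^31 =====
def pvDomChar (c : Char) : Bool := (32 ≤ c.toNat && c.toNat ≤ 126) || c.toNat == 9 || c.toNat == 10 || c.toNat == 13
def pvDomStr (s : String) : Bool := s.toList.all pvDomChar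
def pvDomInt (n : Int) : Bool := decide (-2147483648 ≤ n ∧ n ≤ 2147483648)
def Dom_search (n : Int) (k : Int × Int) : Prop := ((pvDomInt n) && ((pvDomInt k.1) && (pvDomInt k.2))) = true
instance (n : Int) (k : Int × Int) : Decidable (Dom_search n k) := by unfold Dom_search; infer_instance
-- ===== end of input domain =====

-- B replaces the deque BFS by a queue-free fixpoint relaxation: synchronous whole-board sweeps in
-- which each still-zero cell becomes 1 + min of its nonzero in-bounds neighbours, until a sweep
-- changes nothing; objective: alternative algorithm, not faster.

-- ===== PORT A =====
-- board[y][x] read/write: every access A performs is at indices 0 ≤ x,y < n (the valid filter /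
-- the centre under Pre_), where getD/set on the toNat index is exactly Python's board[y][x].
def pvGet2 (b : List (List Int)) (y x : Int) : Int :=
  (b.getD y.toNat []).getD x.toNat 0

def pvSet2 (b : List (List Int)) (y x : Int) (v : Int) : List (List Int) :=
  b.set y.toNat ((b.getD y.toNat []).set x.toNat v)

-- new_board(n)
def pvNewBoard (n : Int) : List (List Int) :=
  (PySem.List.pyRange 0 n 1).map (fun _ => (PySem.List.pyRange 0 n 1).map (fun _ => (0 : Int)))

-- all_moves(k)
def pvAllMoves (k : Int × Int) : List (Int × Int) :=
  let moves := [(k.1, k.2), (-1 * k.1, k.2), (k.1, -1 * k.2), (-1 * k.1, -1 * k.2)]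
  moves ++ moves.map (fun p => (p.2, p.1))

-- move_valid(n)
def pvValid (n : Int) (m : Int × Int) : Bool :=
  decide (0 ≤ m.1) && decide (m.1 < n) && decide (0 ≤ m.2) && decide (m.2 < n)

-- one iteration of A's while body for the popped cell (x, y): reads i = board[y][x], builds the
-- filtered next_moves, and the inner for loop writing i+1 and collecting the cells it appends to q
def pvExpandA (n : Int) (moves : List (Int × Int)) (b : List (List Int)) (cell : Int × Int) :
    List (List Int) × List (Int × Int) :=
  let i := pvGet2 b cell.2 cell.1
  let nextMoves := (moves.map (fun m => (cell.1 + m.1, cell.2 + m.2))).filter (pvValid n)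
  nextMoves.foldl
    (fun st c =>
      if pvGet2 st.1 c.2 c.1 ≠ 0 then st
      else (pvSet2 st.1 c.2 c.1 (i + 1), st.2 ++ [c]))
    (b, [])

-- A's while loop over the deque (popleft from the front, append at the back); the fuel argument is
-- only a totality device, 2*n²+1 is proved sufficient below
def pvLoopA (n : Int) (moves : List (Int × Int)) :
    Nat → List (List Int) → List (Int × Int) → List (List Int)
  | 0, b, _ => b
  | _ + 1, b, [] => b
  | f + 1, b, c :: rest =>
      let e := pvExpandA n moves b c
      pvLoopA n moves f e.1 (rest ++ e.2)

def search (n : Int) (k : Int × Int) : List (List Int) :=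
  let board := pvNewBoard n
  let moves := pvAllMoves k
  let c := PySem.Int.floordiv (n - 1) 2
  let board := pvSet2 board c c 1
  pvLoopA n moves (2 * n.toNat * n.toNat + 1) board [(c, c)]

-- ===== PORT B =====
def pvMovesB (k : Int × Int) : List (Int × Int) :=
  let base := [(k.1, k.2), (-k.1, k.2), (k.1, -k.2), (-k.1, -k.2)]
  base ++ base.map (fun p => (p.2, p.1))

-- one synchronous sweep of Source B: rebuilds the whole board; each still-zero cell reads the values of
-- its in-bounds nonzero neighbours and becomes min+1; the Bool is Source B's `changed` flag
def pvSweep (n : Int) (moves : List (Int × Int)) (b : List (List Int)) :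
    List (List Int) × Bool :=
  (PySem.List.pyRange 0 n 1).foldl
    (fun st y =>
      let r := (PySem.List.pyRange 0 n 1).foldl
        (fun st2 x =>
          let v := pvGet2 b y x
          if v = 0 then
            let nbrs := (moves.filter (fun m =>
                decide (0 ≤ x + m.1) && decide (x + m.1 < n) &&
                decide (0 ≤ y + m.2) && decide (y + m.2 < n) &&
                !decide (pvGet2 b (y + m.2) (x + m.1) = 0))).map
              (fun m => pvGet2 b (y + m.2) (x + m.1))
            if nbrs ≠ [] then
              (st2.1 ++ [(PySem.List.min? nbrs (fun w => w)).getD 0 + 1], true)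
            else (st2.1 ++ [v], st2.2)
          else (st2.1 ++ [v], st2.2))
        ([], st.2)
      (st.1 ++ [r.1], r.2))
    ([], false)

-- Source B's `while changed` loop; one fuel unit per sweep, n²+1 is proved sufficient below
def pvLoopJ (n : Int) (moves : List (Int × Int)) :
    Nat → List (List Int) → List (List Int)
  | 0, b => b
  | f + 1, b =>
      let r := pvSweep n moves b
      if r.2 then pvLoopJ n moves f r.1 else r.1

def search_alt (n : Int) (k : Int × Int) : List (List Int) :=
  let moves := pvMovesB k
  let board := (PySem.List.pyRange 0 n 1).map (fun _ => List.replicate n.toNat (0 : Int))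
  let c := PySem.Int.floordiv (n - 1) 2
  let board := pvSet2 board c c 1
  pvLoopJ n moves (n.toNat * n.toNat + 1) board

-- ===== PRECONDITION & SPEC =====
-- Pre_ excludes exactly n ≤ 0, where A raises IndexError on board[c][c] (the board is empty); B raises there too.
def Pre_search (n : Int) (k : Int × Int) : Prop := 1 ≤ n
instance (n : Int) (k : Int × Int) : Decidable (Pre_search n k) := by unfold Pre_search; infer_instance

def pvWitness_search : Int × (Int × Int) := (3, (2, 1))

def Spec_search (n : Int) (k : Int × Int) (out : List (List Int)) : Prop := out = search_alt n k
instance (n : Int) (k : Int × Int) (out : List (List Int)) : Decidable (Spec_search n k out) := by unfold Spec_search; infer_instance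

-- ===== CLAIM (what is proved, stated in full; the proofs are below) =====
def Claim_equal_search : Prop := ∀ (n : Int) (k : Int × Int), Dom_search n k → Pre_search n k → Spec_search n k (search n k)

-- ===== LEMMAS AND PROOFS =====

-- ---- generic board infrastructure ----
def pvDims (n : Int) (b : List (List Int)) : Prop :=
  b.length = n.toNat ∧ ∀ row ∈ b, row.length = n.toNat

def pvZ (b : List (List Int)) : Nat :=
  (b.map (fun row => row.countP (fun a => a = 0))).sum

def pvInB (n : Int) (z : Int × Int) : Prop :=
  0 ≤ z.1 ∧ z.1 < n ∧ 0 ≤ z.2 ∧ z.2 < n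

theorem pvGet2_eq (b : List (List Int)) (y x : Int) :
    pvGet2 b y x = (((b[y.toNat]?).getD [])[x.toNat]?).getD 0 := by
  simp [pvGet2, List.getD_eq_getElem?_getD]

theorem pvDims_set2 {n : Int} {b : List (List Int)} (h : pvDims n b) (y x v : Int) :
    pvDims n (pvSet2 b y x v) := by
  obtain ⟨h1, h2⟩ := h
  by_cases hj : y.toNat < b.length
  · refine ⟨by simpa [pvSet2] using h1, ?_⟩
    intro row hrow
    rcases List.mem_or_eq_of_mem_set hrow with hr | hr
    · exact h2 _ hr
    · subst hr
      simp only [List.length_set]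
      exact h2 _ (by rw [List.getD_eq_getElem b [] hj]; exact b.getElem_mem hj)
  · rw [pvSet2, List.set_eq_of_length_le (by omega)]
    exact ⟨h1, h2⟩

theorem pvGet2_set2_eq {n : Int} {b : List (List Int)} (h : pvDims n b)
    {y x : Int} (hy : 0 ≤ y) (hy' : y < n) (hx : 0 ≤ x) (hx' : x < n) (v : Int) :
    pvGet2 (pvSet2 b y x v) y x = v := by
  obtain ⟨h1, h2⟩ := h
  have hj : y.toNat < b.length := by omega
  have hrow : b.getD y.toNat [] = b[y.toNat] := List.getD_eq_getElem b [] hj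
  have hi : x.toNat < (b.getD y.toNat []).length := by
    rw [hrow]; rw [h2 _ (b.getElem_mem hj)]; omega
  rw [pvGet2_eq, pvSet2, List.getElem?_set_self (by omega)]
  simp only [Option.getD_some]
  rw [List.getElem?_set_self (by omega)]
  rfl

theorem pvGet2_set2_ne {b : List (List Int)} {y x y' x' : Int} (v : Int)
    (h : y'.toNat ≠ y.toNat ∨ x'.toNat ≠ x.toNat) :
    pvGet2 (pvSet2 b y x v) y' x' = pvGet2 b y' x' := by
  rw [pvGet2_eq, pvGet2_eq, pvSet2]
  by_cases hyy : y'.toNat = y.toNat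
  · rcases h with h | h
    · exact absurd hyy h
    · rw [hyy]
      by_cases hj : y.toNat < b.length
      · rw [List.getElem?_set_self hj]
        simp only [Option.getD_some]
        rw [List.getD_eq_getElem b [] hj, List.getElem?_set_ne (by omega)]
        simp [List.getElem?_eq_getElem hj]
      · rw [List.set_eq_of_length_le (by omega)]
  · rw [List.getElem?_set_ne (by omega)]

-- set/get at in-bounds cells, phrased on cells
theorem pvGet2_set2_cases {n : Int} {b : List (List Int)} (h : pvDims n b)
    {w z : Int × Int} (hw : pvInB n w) (hz : pvInB n z) (v : Int) :
    pvGet2 (pvSet2 b w.2 w.1 v) z.2 z.1 = if z = w then v else pvGet2 b z.2 z.1 := by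
  obtain ⟨w1, w2, w3, w4⟩ := hw
  obtain ⟨z1, z2, z3, z4⟩ := hz
  by_cases hzw : z = w
  · subst hzw
    rw [if_pos rfl]
    exact pvGet2_set2_eq h z3 z4 z1 z2 v
  · rw [if_neg hzw]
    refine pvGet2_set2_ne v ?_
    have : z.1 ≠ w.1 ∨ z.2 ≠ w.2 := by
      by_contra hc
      push_neg at hc
      exact hzw (Prod.ext_iff.2 ⟨hc.1, hc.2⟩)
    omega

theorem pvZ_set2 {n : Int} {b : List (List Int)} (h : pvDims n b)
    {y x : Int} (hy : 0 ≤ y) (hy' : y < n) (hx : 0 ≤ x) (hx' : x < n)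
    (h0 : pvGet2 b y x = 0) {v : Int} (hv : v ≠ 0) :
    pvZ (pvSet2 b y x v) + 1 = pvZ b := by
  obtain ⟨h1, h2⟩ := h
  have hj : y.toNat < b.length := by omega
  have hrow : b.getD y.toNat [] = b[y.toNat] := List.getD_eq_getElem b [] hj
  have hi : x.toNat < b[y.toNat].length := by
    rw [h2 _ (b.getElem_mem hj)]; omega
  have h0' : b[y.toNat][x.toNat] = 0 := by
    rw [pvGet2_eq] at h0
    rw [List.getElem?_eq_getElem hj] at h0
    simp only [Option.getD_some] at h0
    rw [List.getElem?_eq_getElem hi] at h0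
    simpa using h0
  have hcount : (b[y.toNat].set x.toNat v).countP (fun a => decide (a = 0)) + 1 =
      b[y.toNat].countP (fun a => decide (a = 0)) := by
    rw [List.set_eq_take_append_cons_drop, if_pos hi]
    conv_rhs => rw [← List.take_append_drop x.toNat b[y.toNat], ← List.getElem_cons_drop hi]
    simp only [List.countP_append, List.countP_cons, h0']
    simp [hv]
    omega
  have hb : b.set y.toNat (b[y.toNat].set x.toNat v) =
      b.take y.toNat ++ (b[y.toNat].set x.toNat v) :: b.drop (y.toNat + 1) := by
    rw [List.set_eq_take_append_cons_drop, if_pos hj]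
  rw [pvZ, pvSet2, hrow, hb]
  conv_rhs => rw [pvZ, ← List.take_append_drop y.toNat b, ← List.getElem_cons_drop hj]
  simp only [List.map_append, List.map_cons, List.sum_append, List.sum_cons]
  omega

theorem pvZ_pos {n : Int} {b : List (List Int)} (h : pvDims n b)
    {z : Int × Int} (hz : pvInB n z) (h0 : pvGet2 b z.2 z.1 = 0) : 0 < pvZ b := by
  obtain ⟨h1, h2⟩ := h
  obtain ⟨z1, z2, z3, z4⟩ := hz
  have hj : z.2.toNat < b.length := by omega
  have hi : z.1.toNat < b[z.2.toNat].length := by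
    rw [h2 _ (b.getElem_mem hj)]; omega
  have h0' : b[z.2.toNat][z.1.toNat] = 0 := by
    rw [pvGet2_eq, List.getElem?_eq_getElem hj] at h0
    simp only [Option.getD_some] at h0
    rw [List.getElem?_eq_getElem hi] at h0
    simpa using h0
  have hc : 0 < b[z.2.toNat].countP (fun a => decide (a = 0)) := by
    rw [List.countP_pos_iff]
    exact ⟨_, b[z.2.toNat].getElem_mem hi, by simp [h0']⟩
  have hmem : (b[z.2.toNat].countP (fun a => decide (a = 0))) ∈
      b.map (fun row => row.countP (fun a => decide (a = 0))) :=
    List.mem_map.2 ⟨_, b.getElem_mem hj, rfl⟩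
  calc 0 < b[z.2.toNat].countP (fun a => decide (a = 0)) := hc
    _ ≤ _ := List.single_le_sum (by intro x _; omega) _ hmem

def pvOk (n : Int) (b : List (List Int)) (v : Int) (c : Int × Int) : Prop :=
  0 ≤ c.1 ∧ c.1 < n ∧ 0 ≤ c.2 ∧ c.2 < n ∧ pvGet2 b c.2 c.1 = v

theorem pvGet2_congr {b : List (List Int)} {y x y' x' : Int}
    (hy : y.toNat = y'.toNat) (hx : x.toNat = x'.toNat) :
    pvGet2 b y x = pvGet2 b y' x' := by
  simp [pvGet2, hy, hx]

-- ---- the level-synchronous machine (proof-side intermediate between A's deque and B's sweeps) ----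
def pvLevelStep (n : Int) (moves : List (Int × Int)) (d : Int)
    (st : List (List Int) × List (Int × Int)) (cell : Int × Int) :
    List (List Int) × List (Int × Int) :=
  moves.foldl
    (fun st m =>
      let nx := cell.1 + m.1
      let ny := cell.2 + m.2
      if (decide (0 ≤ nx) && decide (nx < n) && decide (0 ≤ ny) && decide (ny < n)) &&
          decide (pvGet2 st.1 ny nx = 0) then
        (pvSet2 st.1 ny nx (d + 1), st.2 ++ [(nx, ny)])
      else st)
    st

def pvLoopL (n : Int) (moves : List (Int × Int)) :
    Nat → Int → List (List Int) → List (Int × Int) → List (List Int)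
  | 0, _, b, _ => b
  | _ + 1, _, b, [] => b
  | f + 1, d, b, front =>
      let r := front.foldl (pvLevelStep n moves d) (b, [])
      pvLoopL n moves f (d + 1) r.1 r.2

theorem pvStep_main (n d : Int) (hd : 1 ≤ d) (cell : Int × Int) :
    ∀ (ms : List (Int × Int)) (b : List (List Int)) (acc : List (Int × Int)),
      pvDims n b →
      (∀ c ∈ acc, pvOk n b (d + 1) c) →
      (((ms.map (fun m => (cell.1 + m.1, cell.2 + m.2))).filter (pvValid n)).foldl
          (fun st c =>
            if pvGet2 st.1 c.2 c.1 ≠ 0 then st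
            else (pvSet2 st.1 c.2 c.1 (d + 1), st.2 ++ [c])) (b, acc)
        = ms.foldl
          (fun st m =>
            let nx := cell.1 + m.1
            let ny := cell.2 + m.2
            if (decide (0 ≤ nx) && decide (nx < n) && decide (0 ≤ ny) && decide (ny < n)) &&
                decide (pvGet2 st.1 ny nx = 0) then
              (pvSet2 st.1 ny nx (d + 1), st.2 ++ [(nx, ny)])
            else st) (b, acc))
      ∧ (let r := ms.foldl
          (fun st m =>
            let nx := cell.1 + m.1
            let ny := cell.2 + m.2
            if (decide (0 ≤ nx) && decide (nx < n) && decide (0 ≤ ny) && decide (ny < n)) &&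
                decide (pvGet2 st.1 ny nx = 0) then
              (pvSet2 st.1 ny nx (d + 1), st.2 ++ [(nx, ny)])
            else st) (b, acc)
         pvDims n r.1
         ∧ (∀ c ∈ r.2, pvOk n r.1 (d + 1) c)
         ∧ (∀ y x : Int, pvGet2 b y x ≠ 0 → pvGet2 r.1 y x = pvGet2 b y x)
         ∧ pvZ r.1 + r.2.length = pvZ b + acc.length) := by
  intro ms
  induction ms with
  | nil =>
    intro b acc hb hacc
    exact ⟨rfl, hb, hacc, fun _ _ _ => rfl, rfl⟩
  | cons m ms ih =>
    intro b acc hb hacc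
    simp only [List.map_cons, List.foldl_cons]
    by_cases hv : pvValid n (cell.1 + m.1, cell.2 + m.2) = true
    · have hv' : 0 ≤ cell.1 + m.1 ∧ cell.1 + m.1 < n ∧ 0 ≤ cell.2 + m.2 ∧ cell.2 + m.2 < n := by
        simp only [pvValid] at hv
        simp at hv
        tauto
      rw [List.filter_cons_of_pos hv]
      by_cases hz : pvGet2 b (cell.2 + m.2) (cell.1 + m.1) = 0
      · -- a fresh cell: both sides write d+1 and append it
        have hcond : ((decide (0 ≤ cell.1 + m.1) && decide (cell.1 + m.1 < n) &&
            decide (0 ≤ cell.2 + m.2) && decide (cell.2 + m.2 < n)) &&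
            decide (pvGet2 b (cell.2 + m.2) (cell.1 + m.1) = 0)) = true := by
          simp [hv'.1, hv'.2.1, hv'.2.2.1, hv'.2.2.2, hz]
        have hA : (if pvGet2 b (cell.2 + m.2) (cell.1 + m.1) ≠ 0 then (b, acc)
            else (pvSet2 b (cell.2 + m.2) (cell.1 + m.1) (d + 1),
              acc ++ [(cell.1 + m.1, cell.2 + m.2)])) =
            (pvSet2 b (cell.2 + m.2) (cell.1 + m.1) (d + 1),
              acc ++ [(cell.1 + m.1, cell.2 + m.2)]) := by
          simp [hz]
        set b1 := pvSet2 b (cell.2 + m.2) (cell.1 + m.1) (d + 1) with hb1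
        have hb1dims : pvDims n b1 := pvDims_set2 hb _ _ _
        -- previously collected cells keep their value d+1
        have hpres1 : ∀ y x : Int, pvGet2 b y x ≠ 0 → pvGet2 b1 y x = pvGet2 b y x := by
          intro y x hnz
          by_cases hc : y.toNat = (cell.2 + m.2).toNat ∧ x.toNat = (cell.1 + m.1).toNat
          · exact absurd (pvGet2_congr hc.1 hc.2 ▸ hz) hnz
          · exact pvGet2_set2_ne _ (by tauto)
        have hacc1 : ∀ c ∈ acc ++ [(cell.1 + m.1, cell.2 + m.2)], pvOk n b1 (d + 1) c := by
          intro c hc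
          rcases List.mem_append.1 hc with hc | hc
          · obtain ⟨o1, o2, o3, o4, o5⟩ := hacc c hc
            exact ⟨o1, o2, o3, o4, by rw [hpres1 _ _ (by omega)]; exact o5⟩
          · simp only [List.mem_singleton] at hc
            subst hc
            exact ⟨hv'.1, hv'.2.1, hv'.2.2.1, hv'.2.2.2,
              pvGet2_set2_eq hb hv'.2.2.1 hv'.2.2.2 hv'.1 hv'.2.1 _⟩
        have hZ1 : pvZ b1 + 1 = pvZ b :=
          pvZ_set2 hb hv'.2.2.1 hv'.2.2.2 hv'.1 hv'.2.1 hz (by omega)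
        obtain ⟨e1, e2, e3, e4, e5⟩ := ih b1 (acc ++ [(cell.1 + m.1, cell.2 + m.2)]) hb1dims hacc1
        rw [List.foldl_cons, hA]
        simp only [hcond, reduceIte]
        refine ⟨e1, e2, e3, ?_, ?_⟩
        · intro y x hnz
          rw [e4 y x (by rw [hpres1 y x hnz]; exact hnz), hpres1 y x hnz]
        · simp only [List.length_append, List.length_singleton] at e5
          omega
      · -- already-visited cell: both sides skip
        have hcond : ((decide (0 ≤ cell.1 + m.1) && decide (cell.1 + m.1 < n) &&
            decide (0 ≤ cell.2 + m.2) && decide (cell.2 + m.2 < n)) &&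
            decide (pvGet2 b (cell.2 + m.2) (cell.1 + m.1) = 0)) = false := by
          simp [hz]
        obtain ⟨e1, e2, e3, e4, e5⟩ := ih b acc hb hacc
        rw [List.foldl_cons, if_pos hz]
        simp only [hcond, Bool.false_eq_true, reduceIte]
        exact ⟨e1, e2, e3, e4, e5⟩
    · -- out of bounds: filtered out on the A side, condition false on the level side
      have hcond : ((decide (0 ≤ cell.1 + m.1) && decide (cell.1 + m.1 < n) &&
          decide (0 ≤ cell.2 + m.2) && decide (cell.2 + m.2 < n)) &&
          decide (pvGet2 b (cell.2 + m.2) (cell.1 + m.1) = 0)) = false := by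
        simp only [pvValid] at hv
        simp only [Bool.and_eq_false_iff]
        left
        revert hv
        cases h1 : decide (0 ≤ cell.1 + m.1) <;> cases h2 : decide (cell.1 + m.1 < n) <;>
          cases h3 : decide (0 ≤ cell.2 + m.2) <;> cases h4 : decide (cell.2 + m.2 < n) <;> simp
      rw [List.filter_cons_of_neg (by simpa using hv)]
      obtain ⟨e1, e2, e3, e4, e5⟩ := ih b acc hb hacc
      simp only [hcond, Bool.false_eq_true, reduceIte]
      exact ⟨e1, e2, e3, e4, e5⟩

theorem pvFoldA_shift (w : Int) :
    ∀ (L : List (Int × Int)) (b : List (List Int)) (acc : List (Int × Int)),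
      L.foldl (fun st c => if pvGet2 st.1 c.2 c.1 ≠ 0 then st
        else (pvSet2 st.1 c.2 c.1 w, st.2 ++ [c])) (b, acc)
      = ((L.foldl (fun st c => if pvGet2 st.1 c.2 c.1 ≠ 0 then st
          else (pvSet2 st.1 c.2 c.1 w, st.2 ++ [c])) (b, [])).1,
         acc ++ (L.foldl (fun st c => if pvGet2 st.1 c.2 c.1 ≠ 0 then st
          else (pvSet2 st.1 c.2 c.1 w, st.2 ++ [c])) (b, [])).2) := by
  intro L
  induction L with
  | nil => intro b acc; simp
  | cons c L ih =>
    intro b acc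
    simp only [List.foldl_cons]
    by_cases h : pvGet2 b c.2 c.1 ≠ 0
    · rw [if_pos h, if_pos h]
      exact ih b acc
    · rw [if_neg h, if_neg h]
      rw [ih _ (acc ++ [c])]
      simp only [List.nil_append]
      rw [ih _ [c]]
      simp

theorem pvLoopA_level (n : Int) (moves : List (Int × Int)) :
    ∀ (F : List (Int × Int)) (b : List (List Int)) (G : List (Int × Int)) (f : Nat),
      pvLoopA n moves (f + F.length) b (F ++ G) =
        (let r := F.foldl (fun st c => let e := pvExpandA n moves st.1 c; (e.1, st.2 ++ e.2)) (b, G)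
         pvLoopA n moves f r.1 r.2) := by
  intro F
  induction F with
  | nil => intro b G f; simp
  | cons c F ih =>
    intro b G f
    simp only [List.length_cons, List.cons_append, List.foldl_cons]
    have hfuel : f + (F.length + 1) = (f + F.length) + 1 := by omega
    rw [hfuel]
    show pvLoopA n moves (f + F.length) (pvExpandA n moves b c).1
        ((F ++ G) ++ (pvExpandA n moves b c).2) = _
    rw [List.append_assoc]
    exact ih (pvExpandA n moves b c).1 (G ++ (pvExpandA n moves b c).2) f

theorem pvLevel_main (n : Int) (moves : List (Int × Int)) (d : Int) (hd : 1 ≤ d) :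
    ∀ (F : List (Int × Int)) (b : List (List Int)) (acc : List (Int × Int)),
      pvDims n b →
      (∀ c ∈ F, pvOk n b d c) →
      (∀ c ∈ acc, pvOk n b (d + 1) c) →
      (F.foldl (fun st c => let e := pvExpandA n moves st.1 c; (e.1, st.2 ++ e.2)) (b, acc)
        = F.foldl (pvLevelStep n moves d) (b, acc))
      ∧ (let r := F.foldl (pvLevelStep n moves d) (b, acc)
         pvDims n r.1
         ∧ (∀ c ∈ r.2, pvOk n r.1 (d + 1) c)
         ∧ pvZ r.1 + r.2.length = pvZ b + acc.length) := by
  intro F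
  induction F with
  | nil =>
    intro b acc hb _ hacc
    exact ⟨rfl, hb, hacc, rfl⟩
  | cons c F ihF =>
    intro b acc hb hF hacc
    have hc := hF c (List.mem_cons_self ..)
    obtain ⟨c1, c2, c3, c4, c5⟩ := hc
    have hstep : (fun (st : List (List Int) × List (Int × Int)) c =>
        let e := pvExpandA n moves st.1 c; (e.1, st.2 ++ e.2)) (b, acc) c
        = pvLevelStep n moves d (b, acc) c := by
      have hs := (pvStep_main n d hd c moves b acc hb hacc).1
      rw [pvFoldA_shift] at hs
      show (let e := pvExpandA n moves b c; (e.1, acc ++ e.2)) = _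
      rw [pvExpandA]
      simp only [c5]
      exact hs
    obtain ⟨s1, s2, s3, s4⟩ := (pvStep_main n d hd c moves b acc hb hacc).2
    have s3' : ∀ y x : Int, pvGet2 b y x ≠ 0 →
        pvGet2 (pvLevelStep n moves d (b, acc) c).1 y x = pvGet2 b y x := s3
    have s4' : pvZ (pvLevelStep n moves d (b, acc) c).1 +
        (pvLevelStep n moves d (b, acc) c).2.length = pvZ b + acc.length := s4
    have hF' : ∀ c' ∈ F, pvOk n (pvLevelStep n moves d (b, acc) c).1 d c' := by
      intro c' hmem
      obtain ⟨o1, o2, o3, o4, o5⟩ := hF c' (List.mem_cons_of_mem _ hmem)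
      exact ⟨o1, o2, o3, o4, by rw [s3' _ _ (by omega)]; exact o5⟩
    obtain ⟨ih1, ih2, ih3, ih4⟩ :=
      ihF (pvLevelStep n moves d (b, acc) c).1 (pvLevelStep n moves d (b, acc) c).2 s1 hF' s2
    simp only [List.foldl_cons, hstep]
    rw [Prod.mk.eta] at ih1 ih2 ih3 ih4
    refine ⟨ih1, ih2, ih3, ?_⟩
    simp only at ih4 s4' ⊢
    omega

theorem pvLoopA_nil (n : Int) (moves : List (Int × Int)) (f : Nat) (b : List (List Int)) :
    pvLoopA n moves f b [] = b := by
  cases f <;> rfl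

theorem pvLoopL_nil (n : Int) (moves : List (Int × Int)) (f : Nat) (d : Int) (b : List (List Int)) :
    pvLoopL n moves f d b [] = b := by
  cases f <;> rfl

theorem pvMain (n : Int) (moves : List (Int × Int)) :
    ∀ (z : Nat) (b : List (List Int)) (F : List (Int × Int)) (d : Int) (fa fb : Nat),
      pvZ b ≤ z → pvDims n b → 1 ≤ d → (∀ c ∈ F, pvOk n b d c) →
      2 * pvZ b + F.length ≤ fa → pvZ b + 1 ≤ fb →
      pvLoopA n moves fa b F = pvLoopL n moves fb d b F := by
  intro z
  induction z with
  | zero =>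
    intro b F d fa fb hz hb hd hF hfa hfb
    rcases F with _ | ⟨c0, F0⟩
    · rw [pvLoopA_nil, pvLoopL_nil]
    · obtain ⟨fa', rfl⟩ : ∃ fa', fa = fa' + (c0 :: F0).length :=
        ⟨fa - (c0 :: F0).length, by omega⟩
      obtain ⟨fb', rfl⟩ : ∃ fb', fb = fb' + 1 := ⟨fb - 1, by omega⟩
      obtain ⟨heq, hdims, hok, hZ⟩ :=
        pvLevel_main n moves d hd (c0 :: F0) b [] hb hF (by simp)
      have hA := pvLoopA_level n moves (c0 :: F0) b [] fa'
      rw [List.append_nil] at hA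
      rw [hA]
      simp only at heq hZ ⊢
      rw [heq]
      simp only [List.length_nil] at hZ
      by_cases hnf : ((c0 :: F0).foldl (pvLevelStep n moves d) (b, [])).2 = []
      · rw [hnf, pvLoopA_nil]
        have hB : pvLoopL n moves (fb' + 1) d b (c0 :: F0) =
            pvLoopL n moves fb' (d + 1) ((c0 :: F0).foldl (pvLevelStep n moves d) (b, [])).1
              ((c0 :: F0).foldl (pvLevelStep n moves d) (b, [])).2 := rfl
        rw [hB, hnf, pvLoopL_nil]
      · exfalso
        have hlen1 : 0 < ((c0 :: F0).foldl (pvLevelStep n moves d) (b, [])).2.length :=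
          List.length_pos_of_ne_nil hnf
        omega
  | succ z ih =>
    intro b F d fa fb hz hb hd hF hfa hfb
    rcases F with _ | ⟨c0, F0⟩
    · rw [pvLoopA_nil, pvLoopL_nil]
    · obtain ⟨fa', rfl⟩ : ∃ fa', fa = fa' + (c0 :: F0).length :=
        ⟨fa - (c0 :: F0).length, by omega⟩
      obtain ⟨fb', rfl⟩ : ∃ fb', fb = fb' + 1 := ⟨fb - 1, by omega⟩
      obtain ⟨heq, hdims, hok, hZ⟩ :=
        pvLevel_main n moves d hd (c0 :: F0) b [] hb hF (by simp)
      have hA := pvLoopA_level n moves (c0 :: F0) b [] fa'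
      rw [List.append_nil] at hA
      rw [hA]
      simp only at heq hZ ⊢
      rw [heq]
      simp only [List.length_nil] at hZ
      have hB : pvLoopL n moves (fb' + 1) d b (c0 :: F0) =
          pvLoopL n moves fb' (d + 1) ((c0 :: F0).foldl (pvLevelStep n moves d) (b, [])).1
            ((c0 :: F0).foldl (pvLevelStep n moves d) (b, [])).2 := rfl
      rw [hB]
      by_cases hnf : ((c0 :: F0).foldl (pvLevelStep n moves d) (b, [])).2 = []
      · rw [hnf, pvLoopA_nil, pvLoopL_nil]
      · have hlen1 : 0 < ((c0 :: F0).foldl (pvLevelStep n moves d) (b, [])).2.length :=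
          List.length_pos_of_ne_nil hnf
        exact ih _ _ (d + 1) fa' fb' (by omega) hdims (by omega) hok (by omega) (by omega)

theorem pvMoves_eq (k : Int × Int) : pvAllMoves k = pvMovesB k := by
  simp [pvAllMoves, pvMovesB]

theorem pvBoardB_eq (n : Int) :
    (PySem.List.pyRange 0 n 1).map (fun _ => List.replicate n.toNat (0 : Int)) = pvNewBoard n := by
  rw [pvNewBoard]
  have h : (PySem.List.pyRange 0 n 1).map (fun _ => (0 : Int)) = List.replicate n.toNat 0 := by
    rw [List.map_const', PySem.List.length_pyRange_one]
    norm_num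
  rw [h]

theorem pvDims_new (n : Int) : pvDims n (pvNewBoard n) := by
  constructor
  · rw [pvNewBoard, List.length_map, PySem.List.length_pyRange_one]
    norm_num
  · intro row hrow
    rw [pvNewBoard] at hrow
    obtain ⟨_, _, rfl⟩ := List.mem_map.1 hrow
    rw [List.length_map, PySem.List.length_pyRange_one]
    norm_num

theorem pvGet2_new (n : Int) (y x : Int) : pvGet2 (pvNewBoard n) y x = 0 := by
  rw [pvGet2_eq]
  rcases h : (pvNewBoard n)[y.toNat]? with _ | row
  · simp
  · have hrow := List.mem_of_getElem? h
    rw [pvNewBoard] at hrow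
    obtain ⟨_, _, rfl⟩ := List.mem_map.1 hrow
    simp only [Option.getD_some]
    rcases h2 : ((PySem.List.pyRange 0 n 1).map (fun _ => (0 : Int)))[x.toNat]? with _ | v
    · simp
    · have hv := List.mem_of_getElem? h2
      obtain ⟨_, _, rfl⟩ := List.mem_map.1 hv
      simp

theorem pvZ_new (n : Int) : pvZ (pvNewBoard n) = n.toNat * n.toNat := by
  rw [pvZ, pvNewBoard, List.map_map]
  have h : ((fun row => List.countP (fun a => decide (a = 0)) row) ∘
      fun _ => (PySem.List.pyRange 0 n 1).map (fun _ => (0 : Int))) =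
      fun (_ : Int) => n.toNat := by
    funext _
    simp only [Function.comp_apply]
    rw [List.countP_eq_length.2 (by intro a ha; obtain ⟨_, _, rfl⟩ := List.mem_map.1 ha; simp)]
    rw [List.length_map, PySem.List.length_pyRange_one]
    norm_num
  rw [h, List.map_const', List.sum_replicate, PySem.List.length_pyRange_one]
  simp

-- ---- reachability in one move ----
def pvReach1 (f : Int × Int) (ms : List (Int × Int)) (z : Int × Int) : Prop :=
  ∃ m ∈ ms, f.1 + m.1 = z.1 ∧ f.2 + m.2 = z.2

def pvReach (S : List (Int × Int)) (ms : List (Int × Int)) (z : Int × Int) : Prop :=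
  ∃ f ∈ S, pvReach1 f ms z

-- pointwise description of expanding ONE cell f over the move list (the body of pvLevelStep)
theorem pvCellPt (n d : Int) (hd : 1 ≤ d) (f : Int × Int) :
    ∀ (ms : List (Int × Int)) (b : List (List Int)) (acc : List (Int × Int)), pvDims n b →
      (let r := ms.foldl
          (fun st m =>
            let nx := f.1 + m.1
            let ny := f.2 + m.2
            if (decide (0 ≤ nx) && decide (nx < n) && decide (0 ≤ ny) && decide (ny < n)) &&
                decide (pvGet2 st.1 ny nx = 0) then
              (pvSet2 st.1 ny nx (d + 1), st.2 ++ [(nx, ny)])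
            else st) (b, acc)
       pvDims n r.1
       ∧ (∀ z : Int × Int, pvInB n z → pvGet2 b z.2 z.1 = 0 → pvReach1 f ms z →
            pvGet2 r.1 z.2 z.1 = d + 1)
       ∧ (∀ z : Int × Int, pvInB n z → ¬ (pvGet2 b z.2 z.1 = 0 ∧ pvReach1 f ms z) →
            pvGet2 r.1 z.2 z.1 = pvGet2 b z.2 z.1)
       ∧ (∀ z : Int × Int, z ∈ r.2 ↔ z ∈ acc ∨
            (pvInB n z ∧ pvGet2 b z.2 z.1 = 0 ∧ pvReach1 f ms z))) := by
  intro ms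
  induction ms with
  | nil =>
    intro b acc hb
    refine ⟨hb, ?_, ?_, ?_⟩
    · intro z _ _ hr
      simp [pvReach1] at hr
    · intro z _ _
      rfl
    · intro z
      simp [pvReach1]
  | cons m ms ih =>
    intro b acc hb
    simp only [List.foldl_cons]
    by_cases hcnd : ((decide (0 ≤ f.1 + m.1) && decide (f.1 + m.1 < n) &&
        decide (0 ≤ f.2 + m.2) && decide (f.2 + m.2 < n)) &&
        decide (pvGet2 b (f.2 + m.2) (f.1 + m.1) = 0)) = true
    · -- the write happens
      have hv' : 0 ≤ f.1 + m.1 ∧ f.1 + m.1 < n ∧ 0 ≤ f.2 + m.2 ∧ f.2 + m.2 < n ∧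
          pvGet2 b (f.2 + m.2) (f.1 + m.1) = 0 := by
        simp at hcnd; tauto
      have hw : pvInB n ((f.1 + m.1, f.2 + m.2) : Int × Int) :=
        ⟨hv'.1, hv'.2.1, hv'.2.2.1, hv'.2.2.2.1⟩
      simp only [hcnd, reduceIte]
      set b1 := pvSet2 b (f.2 + m.2) (f.1 + m.1) (d + 1) with hb1
      have hb1dims : pvDims n b1 := pvDims_set2 hb _ _ _
      have hget1 : ∀ z : Int × Int, pvInB n z →
          pvGet2 b1 z.2 z.1 = if z = (f.1 + m.1, f.2 + m.2) then d + 1 else pvGet2 b z.2 z.1 :=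
        fun z hz => pvGet2_set2_cases hb hw hz (d + 1)
      obtain ⟨ih1, ih2, ih3, ih4⟩ := ih b1 (acc ++ [(f.1 + m.1, f.2 + m.2)]) hb1dims
      refine ⟨ih1, ?_, ?_, ?_⟩
      · intro z hz h0 hr
        by_cases hzw : z = (f.1 + m.1, f.2 + m.2)
        · have hb1v : pvGet2 b1 z.2 z.1 = d + 1 := by rw [hget1 z hz, if_pos hzw]
          rw [ih3 z hz (by rw [hb1v]; rintro ⟨hc0, _⟩; omega), hb1v]
        · have hb1z : pvGet2 b1 z.2 z.1 = pvGet2 b z.2 z.1 := by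
            rw [hget1 z hz, if_neg hzw]
          rcases hr with ⟨m', hm', e1, e2⟩
          rcases List.mem_cons.1 hm' with rfl | hm'
          · exact absurd (Prod.ext e1.symm e2.symm) hzw
          · exact ih2 z hz (by rw [hb1z]; exact h0) ⟨m', hm', e1, e2⟩
      · intro z hz hnc
        by_cases hzw : z = (f.1 + m.1, f.2 + m.2)
        · exfalso
          apply hnc
          subst hzw
          exact ⟨hv'.2.2.2.2, ⟨m, List.mem_cons_self .., rfl, rfl⟩⟩
        · have hb1z : pvGet2 b1 z.2 z.1 = pvGet2 b z.2 z.1 := by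
            rw [hget1 z hz, if_neg hzw]
          rw [← hb1z]
          refine ih3 z hz ?_
          rw [hb1z]
          intro ⟨h0, hr⟩
          exact hnc ⟨h0, hr.imp (fun m' ⟨hm', e⟩ => ⟨List.mem_cons_of_mem _ hm', e⟩)⟩
      · intro z
        rw [ih4 z]
        by_cases hzw : z = (f.1 + m.1, f.2 + m.2)
        · subst hzw
          constructor
          · intro _
            exact Or.inr ⟨hw, hv'.2.2.2.2, ⟨m, List.mem_cons_self .., rfl, rfl⟩⟩
          · intro _
            exact Or.inl (List.mem_append.2 (Or.inr (List.mem_singleton.2 rfl)))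
        · have hacc1 : z ∈ acc ++ [(f.1 + m.1, f.2 + m.2)] ↔ z ∈ acc := by
            simp [hzw]
          rw [hacc1]
          by_cases hz : pvInB n z
          · have hb1z : pvGet2 b1 z.2 z.1 = pvGet2 b z.2 z.1 := by
              rw [pvGet2_set2_cases hb hw hz (d + 1), if_neg hzw]
            rw [hb1z]
            constructor
            · rintro (h | ⟨h1, h2, h3⟩)
              · exact Or.inl h
              · exact Or.inr ⟨h1, h2, h3.imp (fun m' ⟨hm', e⟩ => ⟨List.mem_cons_of_mem _ hm', e⟩)⟩
            · rintro (h | ⟨h1, h2, m', hm', e1, e2⟩)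
              · exact Or.inl h
              · rcases List.mem_cons.1 hm' with rfl | hm'
                · exact absurd (Prod.ext e1.symm e2.symm) hzw
                · exact Or.inr ⟨h1, h2, ⟨m', hm', e1, e2⟩⟩
          · constructor
            · rintro (h | ⟨h1, _⟩)
              · exact Or.inl h
              · exact absurd h1 hz
            · rintro (h | ⟨h1, _⟩)
              · exact Or.inl h
              · exact absurd h1 hz
    · -- no write: either out of bounds or the target is already nonzero
      have hkey : ∀ z : Int × Int, pvInB n z → f.1 + m.1 = z.1 → f.2 + m.2 = z.2 →
          pvGet2 b z.2 z.1 ≠ 0 := by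
        intro z hz e1 e2 h0
        apply hcnd
        obtain ⟨z1, z2, z3, z4⟩ := hz
        have h0' : pvGet2 b (f.2 + m.2) (f.1 + m.1) = 0 := by
          rw [e1, e2]; exact h0
        simp [h0']
        omega
      simp only [Bool.not_eq_true] at hcnd
      simp only [hcnd, Bool.false_eq_true, reduceIte]
      obtain ⟨ih1, ih2, ih3, ih4⟩ := ih b acc hb
      refine ⟨ih1, ?_, ?_, ?_⟩
      · intro z hz h0 hr
        rcases hr with ⟨m', hm', e1, e2⟩
        rcases List.mem_cons.1 hm' with rfl | hm'
        · exact absurd h0 (hkey z hz e1 e2)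
        · exact ih2 z hz h0 ⟨m', hm', e1, e2⟩
      · intro z hz hnc
        refine ih3 z hz ?_
        intro ⟨h0, hr⟩
        exact hnc ⟨h0, hr.imp (fun m' ⟨hm', e⟩ => ⟨List.mem_cons_of_mem _ hm', e⟩)⟩
      · intro z
        rw [ih4 z]
        constructor
        · rintro (h | ⟨h1, h2, h3⟩)
          · exact Or.inl h
          · exact Or.inr ⟨h1, h2, h3.imp (fun m' ⟨hm', e⟩ => ⟨List.mem_cons_of_mem _ hm', e⟩)⟩
        · rintro (h | ⟨h1, h2, m', hm', e1, e2⟩)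
          · exact Or.inl h
          · rcases List.mem_cons.1 hm' with rfl | hm'
            · exact absurd h2 (hkey z h1 e1 e2)
            · exact Or.inr ⟨h1, h2, ⟨m', hm', e1, e2⟩⟩

-- pointwise description of expanding a whole frontier F
theorem pvFrontPt (n d : Int) (hd : 1 ≤ d) (moves : List (Int × Int)) :
    ∀ (F : List (Int × Int)) (b : List (List Int)) (acc : List (Int × Int)), pvDims n b →
      (let r := F.foldl (pvLevelStep n moves d) (b, acc)
       pvDims n r.1
       ∧ (∀ z : Int × Int, pvInB n z → pvGet2 b z.2 z.1 = 0 → pvReach F moves z →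
            pvGet2 r.1 z.2 z.1 = d + 1)
       ∧ (∀ z : Int × Int, pvInB n z → ¬ (pvGet2 b z.2 z.1 = 0 ∧ pvReach F moves z) →
            pvGet2 r.1 z.2 z.1 = pvGet2 b z.2 z.1)
       ∧ (∀ z : Int × Int, z ∈ r.2 ↔ z ∈ acc ∨
            (pvInB n z ∧ pvGet2 b z.2 z.1 = 0 ∧ pvReach F moves z))) := by
  intro F
  induction F with
  | nil =>
    intro b acc hb
    refine ⟨hb, ?_, ?_, ?_⟩
    · intro z _ _ hr
      simp [pvReach] at hr
    · intro z _ _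
      rfl
    · intro z
      simp [pvReach]
  | cons c F ihF =>
    intro b acc hb
    simp only [List.foldl_cons]
    obtain ⟨c1, c2, c3, c4⟩ := pvCellPt n d hd c moves b acc hb
    have hcell : pvLevelStep n moves d (b, acc) c =
        moves.foldl
          (fun st m =>
            let nx := c.1 + m.1
            let ny := c.2 + m.2
            if (decide (0 ≤ nx) && decide (nx < n) && decide (0 ≤ ny) && decide (ny < n)) &&
                decide (pvGet2 st.1 ny nx = 0) then
              (pvSet2 st.1 ny nx (d + 1), st.2 ++ [(nx, ny)])
            else st) (b, acc) := rfl
    rw [hcell] at *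
    set st1 := moves.foldl
        (fun st m =>
          let nx := c.1 + m.1
          let ny := c.2 + m.2
          if (decide (0 ≤ nx) && decide (nx < n) && decide (0 ≤ ny) && decide (ny < n)) &&
              decide (pvGet2 st.1 ny nx = 0) then
            (pvSet2 st.1 ny nx (d + 1), st.2 ++ [(nx, ny)])
          else st) (b, acc) with hst1
    obtain ⟨ih1, ih2, ih3, ih4⟩ := ihF st1.1 st1.2 c1
    rw [Prod.mk.eta] at ih1 ih2 ih3 ih4
    refine ⟨ih1, ?_, ?_, ?_⟩
    · -- a cell reached from c :: F becomes d+1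
      intro z hz h0 hr
      rcases hr with ⟨g, hg, hrg⟩
      rcases List.mem_cons.1 hg with rfl | hg
      · -- reached from the head cell c
        have h1 : pvGet2 st1.1 z.2 z.1 = d + 1 := c2 z hz h0 hrg
        refine (?_ : pvGet2 ((F.foldl (pvLevelStep n moves d) st1).1) z.2 z.1 = d + 1)
        rw [ih3 z hz (by rw [h1]; intro hcc; omega)]
        exact h1
      · -- reached from the tail
        by_cases hzc : pvReach1 c moves z
        · have h1 : pvGet2 st1.1 z.2 z.1 = d + 1 := c2 z hz h0 hzc
          rw [ih3 z hz (by rw [h1]; intro hcc; omega)]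
          exact h1
        · have h1 : pvGet2 st1.1 z.2 z.1 = pvGet2 b z.2 z.1 := c3 z hz (by tauto)
          exact ih2 z hz (by rw [h1]; exact h0) ⟨g, hg, hrg⟩
    · -- untouched cells keep their value
      intro z hz hnc
      have hnc1 : ¬ (pvGet2 b z.2 z.1 = 0 ∧ pvReach1 c moves z) := by
        intro ⟨h0, hr⟩
        exact hnc ⟨h0, ⟨c, List.mem_cons_self .., hr⟩⟩
      have h1 : pvGet2 st1.1 z.2 z.1 = pvGet2 b z.2 z.1 := c3 z hz hnc1
      rw [ih3 z hz ?_, h1]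
      rw [h1]
      intro ⟨h0, g, hg, hrg⟩
      exact hnc ⟨h0, ⟨g, List.mem_cons_of_mem _ hg, hrg⟩⟩
    · -- membership in the collected frontier
      intro z
      rw [ih4 z, c4 z]
      by_cases hz : pvInB n z
      · by_cases h0 : pvGet2 b z.2 z.1 = 0
        · by_cases hzc : pvReach1 c moves z
          · have h1 : pvGet2 st1.1 z.2 z.1 = d + 1 := c2 z hz h0 hzc
            constructor
            · rintro ((h | h) | ⟨_, h2, _⟩)
              · exact Or.inl h
              · exact Or.inr ⟨hz, h0, ⟨c, List.mem_cons_self .., hzc⟩⟩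
              · rw [h1] at h2; omega
            · rintro (h | _)
              · exact Or.inl (Or.inl h)
              · exact Or.inl (Or.inr ⟨hz, h0, hzc⟩)
          · have h1 : pvGet2 st1.1 z.2 z.1 = pvGet2 b z.2 z.1 := c3 z hz (by tauto)
            constructor
            · rintro ((h | ⟨_, _, h⟩) | ⟨_, h2, g, hg, hrg⟩)
              · exact Or.inl h
              · exact absurd h hzc
              · exact Or.inr ⟨hz, h0, ⟨g, List.mem_cons_of_mem _ hg, hrg⟩⟩
            · rintro (h | ⟨_, _, g, hg, hrg⟩)
              · exact Or.inl (Or.inl h)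
              · rcases List.mem_cons.1 hg with rfl | hg
                · exact absurd hrg hzc
                · exact Or.inr ⟨hz, by rw [h1]; exact h0, ⟨g, hg, hrg⟩⟩
        · have h1 : pvGet2 st1.1 z.2 z.1 = pvGet2 b z.2 z.1 := c3 z hz (by tauto)
          constructor
          · rintro ((h | ⟨_, h2, _⟩) | ⟨_, h2, _⟩)
            · exact Or.inl h
            · exact absurd h2 h0
            · rw [h1] at h2; exact absurd h2 h0
          · rintro (h | ⟨_, h2, _⟩)
            · exact Or.inl (Or.inl h)
            · exact absurd h2 h0
      · constructor
        · rintro ((h | ⟨h1, _⟩) | ⟨h1, _⟩)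
          · exact Or.inl h
          · exact absurd h1 hz
          · exact absurd h1 hz
        · rintro (h | ⟨h1, _⟩)
          · exact Or.inl (Or.inl h)
          · exact absurd h1 hz

-- ---- normal form of one sweep ----
theorem pvFoldRow {α β : Type} (g : α → β) (t : α → Bool)
    (step : List β × Bool → α → List β × Bool)
    (hstep : ∀ st x, step st x = (st.1 ++ [g x], st.2 || t x)) :
    ∀ (l : List α) (acc : List β) (c : Bool),
      l.foldl step (acc, c) = (acc ++ l.map g, c || l.any t) := by
  intro l
  induction l with
  | nil => intro acc c; simp
  | cons x l ih =>
    intro acc c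
    rw [List.foldl_cons, hstep]
    rw [ih]
    simp [Bool.or_assoc]

def pvNbrs (n : Int) (moves : List (Int × Int)) (b : List (List Int)) (y x : Int) : List Int :=
  (moves.filter (fun m =>
      decide (0 ≤ x + m.1) && decide (x + m.1 < n) &&
      decide (0 ≤ y + m.2) && decide (y + m.2 < n) &&
      !decide (pvGet2 b (y + m.2) (x + m.1) = 0))).map
    (fun m => pvGet2 b (y + m.2) (x + m.1))

def pvSwVal (n : Int) (moves : List (Int × Int)) (b : List (List Int)) (y x : Int) : Int :=
  if pvGet2 b y x = 0 then
    if pvNbrs n moves b y x ≠ [] then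
      (PySem.List.min? (pvNbrs n moves b y x) (fun w => w)).getD 0 + 1
    else pvGet2 b y x
  else pvGet2 b y x

def pvSwTrig (n : Int) (moves : List (Int × Int)) (b : List (List Int)) (y x : Int) : Bool :=
  decide (pvGet2 b y x = 0) && decide (pvNbrs n moves b y x ≠ [])

theorem pvSweep_nf (n : Int) (moves : List (Int × Int)) (b : List (List Int)) :
    pvSweep n moves b =
      ((PySem.List.pyRange 0 n 1).map (fun y =>
          (PySem.List.pyRange 0 n 1).map (fun x => pvSwVal n moves b y x)),
       (PySem.List.pyRange 0 n 1).any (fun y =>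
          (PySem.List.pyRange 0 n 1).any (fun x => pvSwTrig n moves b y x))) := by
  rw [pvSweep]
  have hin : ∀ (y : Int) (st2 : List Int × Bool) (x : Int),
      (fun (st2 : List Int × Bool) (x : Int) =>
          let v := pvGet2 b y x
          if v = 0 then
            let nbrs := (moves.filter (fun m =>
                decide (0 ≤ x + m.1) && decide (x + m.1 < n) &&
                decide (0 ≤ y + m.2) && decide (y + m.2 < n) &&
                !decide (pvGet2 b (y + m.2) (x + m.1) = 0))).map
              (fun m => pvGet2 b (y + m.2) (x + m.1))
            if nbrs ≠ [] then
              (st2.1 ++ [(PySem.List.min? nbrs (fun w => w)).getD 0 + 1], true)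
            else (st2.1 ++ [v], st2.2)
          else (st2.1 ++ [v], st2.2)) st2 x
      = (st2.1 ++ [pvSwVal n moves b y x], st2.2 || pvSwTrig n moves b y x) := by
    intro y st2 x
    by_cases h0 : pvGet2 b y x = 0
    · by_cases hnb : pvNbrs n moves b y x ≠ []
      · simp only [pvSwVal, pvSwTrig, pvNbrs] at *
        simp [h0, hnb]
      · simp only [pvSwVal, pvSwTrig, pvNbrs] at *
        simp [h0, hnb]
    · simp only [pvSwVal, pvSwTrig, pvNbrs] at *
      simp [h0]
  have hout : ∀ (st : List (List Int) × Bool) (y : Int),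
      (fun (st : List (List Int) × Bool) (y : Int) =>
        let r := (PySem.List.pyRange 0 n 1).foldl
          (fun (st2 : List Int × Bool) (x : Int) =>
            let v := pvGet2 b y x
            if v = 0 then
              let nbrs := (moves.filter (fun m =>
                  decide (0 ≤ x + m.1) && decide (x + m.1 < n) &&
                  decide (0 ≤ y + m.2) && decide (y + m.2 < n) &&
                  !decide (pvGet2 b (y + m.2) (x + m.1) = 0))).map
                (fun m => pvGet2 b (y + m.2) (x + m.1))
              if nbrs ≠ [] then
                (st2.1 ++ [(PySem.List.min? nbrs (fun w => w)).getD 0 + 1], true)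
              else (st2.1 ++ [v], st2.2)
            else (st2.1 ++ [v], st2.2))
          ([], st.2)
        (st.1 ++ [r.1], r.2)) st y
      = (st.1 ++ [(PySem.List.pyRange 0 n 1).map (fun x => pvSwVal n moves b y x)],
         st.2 || (PySem.List.pyRange 0 n 1).any (fun x => pvSwTrig n moves b y x)) := by
    intro st y
    have h := pvFoldRow (fun x => pvSwVal n moves b y x) (fun x => pvSwTrig n moves b y x)
      _ (hin y) (PySem.List.pyRange 0 n 1) [] st.2
    simp only
    rw [h]
    simp
  have h2 := pvFoldRow
    (fun y => (PySem.List.pyRange 0 n 1).map (fun x => pvSwVal n moves b y x))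
    (fun y => (PySem.List.pyRange 0 n 1).any (fun x => pvSwTrig n moves b y x))
    _ hout (PySem.List.pyRange 0 n 1) [] false
  rw [h2]
  simp

-- ---- the level invariant coupling the level machine with the sweeps ----
def pvInv (n : Int) (moves : List (Int × Int)) (b : List (List Int))
    (F : List (Int × Int)) (d : Int) : Prop :=
  pvDims n b ∧ 1 ≤ d ∧ (∀ z ∈ F, pvInB n z) ∧
  (∀ z : Int × Int, pvInB n z → (pvGet2 b z.2 z.1 = d ↔ z ∈ F)) ∧
  (∀ z : Int × Int, pvInB n z → pvGet2 b z.2 z.1 ≤ d) ∧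
  (∀ z : Int × Int, pvInB n z → pvGet2 b z.2 z.1 = 0 →
     ∀ m ∈ moves, pvInB n (z.1 + m.1, z.2 + m.2) →
       pvGet2 b (z.2 + m.2) (z.1 + m.1) = 0 ∨ pvGet2 b (z.2 + m.2) (z.1 + m.1) = d)

theorem pvNbrs_all {n : Int} {moves : List (Int × Int)} {b F d}
    (hinv : pvInv n moves b F d) {z : Int × Int} (hz : pvInB n z)
    (h0 : pvGet2 b z.2 z.1 = 0) :
    ∀ a ∈ pvNbrs n moves b z.2 z.1, a = d := by
  obtain ⟨_, _, _, _, _, h6⟩ := hinv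
  intro a ha
  rw [pvNbrs] at ha
  obtain ⟨m, hmf, rfl⟩ := List.mem_map.1 ha
  obtain ⟨hm, hp⟩ := List.mem_filter.1 hmf
  simp only [Bool.and_eq_true, decide_eq_true_eq, Bool.not_eq_eq_eq_not, Bool.not_true,
    decide_eq_false_iff_not] at hp
  rcases h6 z hz h0 m hm ⟨hp.1.1.1.1, hp.1.1.1.2, hp.1.1.2, hp.1.2⟩ with h | h
  · exact absurd h hp.2
  · exact h

theorem pvNbrs_ne_iff {n : Int} {moves : List (Int × Int)} {b F d}
    (hinv : pvInv n moves b F d)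
    (hsym : ∀ m ∈ moves, ((-m.1, -m.2) : Int × Int) ∈ moves)
    {z : Int × Int} (hz : pvInB n z) (h0 : pvGet2 b z.2 z.1 = 0) :
    pvNbrs n moves b z.2 z.1 ≠ [] ↔ pvReach F moves z := by
  obtain ⟨_, hd, h3, h4, _, h6⟩ := hinv
  constructor
  · intro hne
    have : ∃ m ∈ moves, (decide (0 ≤ z.1 + m.1) && decide (z.1 + m.1 < n) &&
        decide (0 ≤ z.2 + m.2) && decide (z.2 + m.2 < n) &&
        !decide (pvGet2 b (z.2 + m.2) (z.1 + m.1) = 0)) = true := by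
      by_contra hc
      push_neg at hc
      apply hne
      rw [pvNbrs, List.map_eq_nil_iff, List.filter_eq_nil_iff]
      intro m hm
      exact (hc m hm)
    obtain ⟨m, hm, hp⟩ := this
    simp only [Bool.and_eq_true, decide_eq_true_eq, Bool.not_eq_eq_eq_not, Bool.not_true,
      decide_eq_false_iff_not] at hp
    have hw : pvInB n ((z.1 + m.1, z.2 + m.2) : Int × Int) :=
      ⟨hp.1.1.1.1, hp.1.1.1.2, hp.1.1.2, hp.1.2⟩
    have hval : pvGet2 b (z.2 + m.2) (z.1 + m.1) = d := by
      rcases h6 z hz h0 m hm hw with h | h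
      · exact absurd h hp.2
      · exact h
    have hF : ((z.1 + m.1, z.2 + m.2) : Int × Int) ∈ F := (h4 _ hw).1 hval
    exact ⟨(z.1 + m.1, z.2 + m.2), hF, (-m.1, -m.2), hsym m hm, by simp, by simp⟩
  · rintro ⟨f, hf, m', hm', e1, e2⟩
    have hm : ((-m'.1, -m'.2) : Int × Int) ∈ moves := hsym m' hm'
    have hfi : pvInB n f := h3 f hf
    have hval : pvGet2 b f.2 f.1 = d := (h4 f hfi).2 hf
    have hco : z.1 + -m'.1 = f.1 ∧ z.2 + -m'.2 = f.2 := by omega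
    intro hnil
    rw [pvNbrs, List.map_eq_nil_iff, List.filter_eq_nil_iff] at hnil
    apply hnil _ hm
    simp only [Bool.and_eq_true, decide_eq_true_eq, Bool.not_eq_eq_eq_not, Bool.not_true,
      decide_eq_false_iff_not]
    have hv' : pvGet2 b (z.2 + -m'.2) (z.1 + -m'.1) = d := by
      rw [show z.2 + -m'.2 = f.2 from hco.2, show z.1 + -m'.1 = f.1 from hco.1]
      exact hval
    obtain ⟨f1, f2, f3, f4⟩ := hfi
    refine ⟨⟨⟨⟨by omega, by omega⟩, by omega⟩, by omega⟩, by simp [hv']; omega⟩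
  
theorem pvMin_nbrs {n : Int} {moves : List (Int × Int)} {b F d}
    (hinv : pvInv n moves b F d) {z : Int × Int} (hz : pvInB n z)
    (h0 : pvGet2 b z.2 z.1 = 0) (hne : pvNbrs n moves b z.2 z.1 ≠ []) :
    (PySem.List.min? (pvNbrs n moves b z.2 z.1) (fun w => w)).getD 0 = d := by
  rcases hmin : PySem.List.min? (pvNbrs n moves b z.2 z.1) (fun w => w) with _ | a
  · exact absurd ((PySem.List.min?_eq_none_iff _ _).1 hmin) hne
  · have ha : a ∈ pvNbrs n moves b z.2 z.1 := PySem.List.min?_mem hmin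
    simp [pvNbrs_all hinv hz h0 a ha]

theorem pvSweep_fst {n : Int} {moves : List (Int × Int)} {b F d}
    (hinv : pvInv n moves b F d)
    (hsym : ∀ m ∈ moves, ((-m.1, -m.2) : Int × Int) ∈ moves) :
    (pvSweep n moves b).1 = (F.foldl (pvLevelStep n moves d) (b, [])).1 := by
  have hb := hinv.1
  have hd := hinv.2.1
  have h5 := hinv.2.2.2.2.1
  obtain ⟨f1, f2, f3, f4⟩ := pvFrontPt n d hd moves F b [] hb
  set r := F.foldl (pvLevelStep n moves d) (b, []) with hr
  rw [pvSweep_nf]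
  have hlen1 : ((PySem.List.pyRange 0 n 1).map (fun y =>
      (PySem.List.pyRange 0 n 1).map (fun x => pvSwVal n moves b y x))).length = r.1.length := by
    rw [List.length_map, PySem.List.length_pyRange_one, f1.1]
    norm_num
  apply List.ext_getElem hlen1
  intro j h1 h2
  have hjN : j < n.toNat := by
    rw [List.length_map, PySem.List.length_pyRange_one] at h1
    omega
  have hyj : (PySem.List.pyRange 0 n 1)[j]'(by rw [PySem.List.length_pyRange_one]; omega)
      = (j : Int) := by
    rw [PySem.List.getElem_pyRange_one]
    omega
  rw [List.getElem_map, hyj]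
  have hrowmem : r.1[j]'h2 ∈ r.1 := List.getElem_mem h2
  have hrowlen : (r.1[j]'h2).length = n.toNat := f1.2 _ hrowmem
  have hlen2 : ((PySem.List.pyRange 0 n 1).map
      (fun x => pvSwVal n moves b (j : Int) x)).length = (r.1[j]'h2).length := by
    rw [List.length_map, PySem.List.length_pyRange_one, hrowlen]
    norm_num
  apply List.ext_getElem hlen2
  intro i hi1 hi2
  have hiN : i < n.toNat := by rwa [hrowlen] at hi2
  have hxi : (PySem.List.pyRange 0 n 1)[i]'(by rw [PySem.List.length_pyRange_one]; omega)
      = (i : Int) := by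
    rw [PySem.List.getElem_pyRange_one]
    omega
  rw [List.getElem_map, hxi]
  have hrget : pvGet2 r.1 (j : Int) (i : Int) = (r.1[j]'h2)[i]'hi2 := by
    rw [pvGet2]
    have e1 : r.1.getD ((j : Int)).toNat [] = r.1[j]'h2 := by
      simp [List.getD_eq_getElem?_getD, List.getElem?_eq_getElem h2]
    rw [e1]
    simp [List.getD_eq_getElem?_getD, List.getElem?_eq_getElem hi2]
  rw [← hrget]
  have hz : pvInB n (((i : Int), (j : Int)) : Int × Int) :=
    ⟨by omega, by omega, by omega, by omega⟩
  by_cases h0 : pvGet2 b (j : Int) (i : Int) = 0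
  · by_cases hreach : pvReach F moves (((i : Int), (j : Int)) : Int × Int)
    · have hne : pvNbrs n moves b (j : Int) (i : Int) ≠ [] :=
        (pvNbrs_ne_iff hinv hsym hz h0).2 hreach
      have hmin : (PySem.List.min? (pvNbrs n moves b (j : Int) (i : Int)) (fun w => w)).getD 0
          = d := pvMin_nbrs hinv hz h0 hne
      rw [pvSwVal, if_pos h0, if_pos hne, hmin, f2 _ hz h0 hreach]
    · have hnn : pvNbrs n moves b (j : Int) (i : Int) = [] := by
        by_contra hc
        exact hreach ((pvNbrs_ne_iff hinv hsym hz h0).1 hc)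
      rw [pvSwVal, if_pos h0, if_neg (by simp [hnn]),
        f3 _ hz (by intro hcc; exact hreach hcc.2)]
  · rw [pvSwVal, if_neg h0, f3 _ hz (by intro hcc; exact h0 hcc.1)]

theorem pvSweep_snd {n : Int} {moves : List (Int × Int)} {b F d}
    (hinv : pvInv n moves b F d)
    (hsym : ∀ m ∈ moves, ((-m.1, -m.2) : Int × Int) ∈ moves) :
    ((pvSweep n moves b).2 = true ↔ (F.foldl (pvLevelStep n moves d) (b, [])).2 ≠ []) := by
  have hb := hinv.1
  have hd := hinv.2.1
  obtain ⟨f1, f2, f3, f4⟩ := pvFrontPt n d hd moves F b [] hb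
  set r := F.foldl (pvLevelStep n moves d) (b, []) with hr
  rw [pvSweep_nf]
  simp only [List.any_eq_true]
  constructor
  · rintro ⟨y, hy, x, hx, ht⟩
    rw [PySem.List.mem_pyRange_one] at hy hx
    rw [pvSwTrig, Bool.and_eq_true, decide_eq_true_eq, decide_eq_true_eq] at ht
    have hz : pvInB n ((x, y) : Int × Int) := ⟨hx.1, hx.2, hy.1, hy.2⟩
    have hrch : pvReach F moves ((x, y) : Int × Int) :=
      (pvNbrs_ne_iff hinv hsym hz ht.1).1 ht.2
    exact List.ne_nil_of_mem ((f4 ((x, y) : Int × Int)).2 (Or.inr ⟨hz, ht.1, hrch⟩))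
  · intro hne
    obtain ⟨z, hzmem⟩ := List.exists_mem_of_ne_nil _ hne
    obtain (h | ⟨hz, h0, hrch⟩) := (f4 z).1 hzmem
    · exact absurd h (List.not_mem_nil)
    · refine ⟨z.2, PySem.List.mem_pyRange_one.2 ⟨hz.2.2.1, hz.2.2.2⟩,
        z.1, PySem.List.mem_pyRange_one.2 ⟨hz.1, hz.2.1⟩, ?_⟩
      rw [pvSwTrig, Bool.and_eq_true, decide_eq_true_eq, decide_eq_true_eq]
      exact ⟨h0, (pvNbrs_ne_iff hinv hsym hz h0).2 hrch⟩

theorem pvInv_step {n : Int} {moves : List (Int × Int)} {b F d}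
    (hinv : pvInv n moves b F d)
    (hsym : ∀ m ∈ moves, ((-m.1, -m.2) : Int × Int) ∈ moves) :
    pvInv n moves (F.foldl (pvLevelStep n moves d) (b, [])).1
      (F.foldl (pvLevelStep n moves d) (b, [])).2 (d + 1) := by
  obtain ⟨hb, hd, h3, h4, h5, h6⟩ := hinv
  obtain ⟨f1, f2, f3, f4⟩ := pvFrontPt n d hd moves F b [] hb
  set r := F.foldl (pvLevelStep n moves d) (b, []) with hr
  refine ⟨f1, by omega, ?_, ?_, ?_, ?_⟩
  · intro z hzm
    obtain (h | ⟨hz, _, _⟩) := (f4 z).1 hzm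
    · exact absurd h (List.not_mem_nil)
    · exact hz
  · intro z hz
    constructor
    · intro hval
      by_cases hc : pvGet2 b z.2 z.1 = 0 ∧ pvReach F moves z
      · exact (f4 z).2 (Or.inr ⟨hz, hc.1, hc.2⟩)
      · exfalso
        rw [f3 z hz hc] at hval
        have := h5 z hz
        omega
    · intro hzm
      obtain (h | ⟨_, h0, hrch⟩) := (f4 z).1 hzm
      · exact absurd h (List.not_mem_nil)
      · exact f2 z hz h0 hrch
  · intro z hz
    by_cases hc : pvGet2 b z.2 z.1 = 0 ∧ pvReach F moves z
    · rw [f2 z hz hc.1 hc.2]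
    · rw [f3 z hz hc]
      have := h5 z hz
      omega
  · intro z hz h0 m hm hw
    have hcz : ¬ (pvGet2 b z.2 z.1 = 0 ∧ pvReach F moves z) := by
      intro hc
      rw [f2 z hz hc.1 hc.2] at h0
      omega
    have h0b : pvGet2 b z.2 z.1 = 0 := by
      rw [f3 z hz hcz] at h0
      exact h0
    have hnr : ¬ pvReach F moves z := fun hrr => hcz ⟨h0b, hrr⟩
    by_cases hcw : pvGet2 b (z.2 + m.2) (z.1 + m.1) = 0 ∧
        pvReach F moves ((z.1 + m.1, z.2 + m.2) : Int × Int)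
    · right
      exact f2 ((z.1 + m.1, z.2 + m.2) : Int × Int) hw hcw.1 hcw.2
    · have hweq : pvGet2 r.1 (z.2 + m.2) (z.1 + m.1) = pvGet2 b (z.2 + m.2) (z.1 + m.1) :=
        f3 ((z.1 + m.1, z.2 + m.2) : Int × Int) hw hcw
      rw [hweq]
      rcases h6 z hz h0b m hm hw with h | h
      · exact Or.inl h
      · -- the neighbour carries value d, hence lies in F, hence z would be reached: contradiction
        exfalso
        apply hnr
        have hwF : ((z.1 + m.1, z.2 + m.2) : Int × Int) ∈ F := (h4 _ hw).1 h
        exact ⟨(z.1 + m.1, z.2 + m.2), hwF, (-m.1, -m.2), hsym m hm, by simp, by simp⟩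

theorem pvLoopJ_step (n : Int) (moves : List (Int × Int)) (f : Nat) (b : List (List Int)) :
    pvLoopJ n moves (f + 1) b =
      if (pvSweep n moves b).2 then pvLoopJ n moves f (pvSweep n moves b).1
      else (pvSweep n moves b).1 := rfl

-- the main coupling: the level machine and the sweep loop compute the same board
theorem pvLJ (n : Int) (moves : List (Int × Int))
    (hsym : ∀ m ∈ moves, ((-m.1, -m.2) : Int × Int) ∈ moves) :
    ∀ (z : Nat) (b : List (List Int)) (F : List (Int × Int)) (d : Int) (fL fJ : Nat),
      pvInv n moves b F d → pvZ b ≤ z → pvZ b + 1 ≤ fL → pvZ b + 1 ≤ fJ →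
      pvLoopL n moves fL d b F = pvLoopJ n moves fJ b := by
  intro z
  induction z with
  | zero =>
    intro b F d fL fJ hinv hz hfL hfJ
    obtain ⟨fJ', rfl⟩ : ∃ fJ', fJ = fJ' + 1 := ⟨fJ - 1, by omega⟩
    have hb := hinv.1
    have hd := hinv.2.1
    have hFok : ∀ c ∈ F, pvOk n b d c := by
      intro c hc
      have hzc := hinv.2.2.1 c hc
      exact ⟨hzc.1, hzc.2.1, hzc.2.2.1, hzc.2.2.2, (hinv.2.2.2.1 c hzc).2 hc⟩
    set r := F.foldl (pvLevelStep n moves d) (b, []) with hr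
    have hZr : pvZ r.1 + r.2.length = pvZ b := by
      have := (pvLevel_main n moves d hd F b [] hb hFok (by simp)).2.2.2
      simpa using this
    have hr2nil : r.2 = [] := by
      rcases List.eq_nil_or_concat r.2 with h | ⟨l, a, h⟩
      · exact h
      · exfalso
        have hmem : a ∈ r.2 := by rw [h]; simp
        obtain ⟨f1, f2, f3, f4⟩ := pvFrontPt n d hd moves F b [] hb
        obtain (hx | ⟨hzin, h0, _⟩) := (f4 a).1 hmem
        · exact absurd hx (List.not_mem_nil)
        · have := pvZ_pos hb hzin h0
          omega
    have hsw1 : (pvSweep n moves b).1 = r.1 := pvSweep_fst hinv hsym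
    have hsw2 : (pvSweep n moves b).2 = false := by
      have := pvSweep_snd hinv hsym
      rcases hv : (pvSweep n moves b).2
      · rfl
      · exact absurd (this.1 hv) (by simp [← hr, hr2nil])
    rw [pvLoopJ_step, hsw2, if_neg (by simp), hsw1]
    rcases F with _ | ⟨c0, F0⟩
    · rw [pvLoopL_nil]
      have : r.1 = b := by rw [hr]; rfl
      rw [this]
    · obtain ⟨fL', rfl⟩ : ∃ fL', fL = fL' + 1 := ⟨fL - 1, by omega⟩
      show pvLoopL n moves fL' (d + 1) r.1 r.2 = r.1
      rw [hr2nil, pvLoopL_nil]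
  | succ z ih =>
    intro b F d fL fJ hinv hz hfL hfJ
    obtain ⟨fJ', rfl⟩ : ∃ fJ', fJ = fJ' + 1 := ⟨fJ - 1, by omega⟩
    have hb := hinv.1
    have hd := hinv.2.1
    have hFok : ∀ c ∈ F, pvOk n b d c := by
      intro c hc
      have hzc := hinv.2.2.1 c hc
      exact ⟨hzc.1, hzc.2.1, hzc.2.2.1, hzc.2.2.2, (hinv.2.2.2.1 c hzc).2 hc⟩
    set r := F.foldl (pvLevelStep n moves d) (b, []) with hr
    have hZr : pvZ r.1 + r.2.length = pvZ b := by
      have := (pvLevel_main n moves d hd F b [] hb hFok (by simp)).2.2.2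
      simpa using this
    have hsw1 : (pvSweep n moves b).1 = r.1 := pvSweep_fst hinv hsym
    rcases F with _ | ⟨c0, F0⟩
    · -- empty frontier: nothing changes on either side
      have hr2nil : r.2 = [] := by rw [hr]; rfl
      have hsw2 : (pvSweep n moves b).2 = false := by
        have := pvSweep_snd hinv hsym
        rcases hv : (pvSweep n moves b).2
        · rfl
        · exact absurd (this.1 hv) (by simp [← hr, hr2nil])
      rw [pvLoopL_nil, pvLoopJ_step, hsw2, if_neg (by simp), hsw1, hr]
      rfl
    · obtain ⟨fL', rfl⟩ : ∃ fL', fL = fL' + 1 := ⟨fL - 1, by omega⟩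
      have hstepL : pvLoopL n moves (fL' + 1) d b (c0 :: F0) =
          pvLoopL n moves fL' (d + 1) r.1 r.2 := rfl
      rw [hstepL, pvLoopJ_step, hsw1]
      by_cases hr2 : r.2 = []
      · have hsw2 : (pvSweep n moves b).2 = false := by
          have := pvSweep_snd hinv hsym
          rcases hv : (pvSweep n moves b).2
          · rfl
          · exact absurd (this.1 hv) (by simp [← hr, hr2])
        rw [hsw2, if_neg (by simp), hr2, pvLoopL_nil]
      · have hsw2 : (pvSweep n moves b).2 = true := by
          rcases hv : (pvSweep n moves b).2
          · exact absurd ((pvSweep_snd hinv hsym).2 hr2) (by simp [hv])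
          · rfl
        rw [hsw2, if_pos (by simp)]
        have hinv' : pvInv n moves r.1 r.2 (d + 1) := pvInv_step hinv hsym
        have hlen : 0 < r.2.length := List.length_pos_of_ne_nil hr2
        exact ih r.1 r.2 (d + 1) fL' fJ' hinv' (by omega) (by omega) (by omega)

theorem pvSym_moves (k : Int × Int) :
    ∀ m ∈ pvAllMoves k, ((-m.1, -m.2) : Int × Int) ∈ pvAllMoves k := by
  intro m hm
  simp only [pvAllMoves, List.mem_append, List.mem_map, List.mem_cons, List.not_mem_nil,
    or_false] at hm ⊢
  rcases hm with (rfl | rfl | rfl | rfl) | ⟨p, hp, rfl⟩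
  · exact Or.inl (by right; right; right; simp)
  · exact Or.inl (by right; right; simp)
  · exact Or.inl (by right; simp)
  · exact Or.inl (by simp)
  · rcases hp with rfl | rfl | rfl | rfl
    · exact Or.inr ⟨(-1 * k.1, -1 * k.2), by simp, by simp⟩
    · exact Or.inr ⟨(k.1, -1 * k.2), by simp, by simp⟩
    · exact Or.inr ⟨(-1 * k.1, k.2), by simp, by simp⟩
    · exact Or.inr ⟨(k.1, k.2), by simp, by simp⟩

theorem pvInv_init (n : Int) (moves : List (Int × Int))
    {c : Int} (hc0 : 0 ≤ c) (hc1 : c < n) :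
    pvInv n moves (pvSet2 (pvNewBoard n) c c 1) [((c, c) : Int × Int)] 1 := by
  have hdims0 := pvDims_new n
  have hw : pvInB n ((c, c) : Int × Int) := ⟨hc0, hc1, hc0, hc1⟩
  have hget : ∀ z : Int × Int, pvInB n z →
      pvGet2 (pvSet2 (pvNewBoard n) c c 1) z.2 z.1 = if z = ((c, c) : Int × Int) then 1 else 0 := by
    intro z hz
    rw [pvGet2_set2_cases hdims0 hw hz 1]
    by_cases hzc : z = ((c, c) : Int × Int)
    · rw [if_pos hzc, if_pos hzc]
    · rw [if_neg hzc, if_neg hzc, pvGet2_new]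
  refine ⟨pvDims_set2 hdims0 c c 1, le_refl 1, ?_, ?_, ?_, ?_⟩
  · intro z hz
    rw [List.mem_singleton] at hz
    subst hz
    exact hw
  · intro z hz
    rw [hget z hz, List.mem_singleton]
    by_cases hzc : z = ((c, c) : Int × Int)
    · simp [hzc]
    · simp [hzc]
  · intro z hz
    rw [hget z hz]
    by_cases hzc : z = ((c, c) : Int × Int)
    · simp [hzc]
    · simp [hzc]
  · intro z hz _ m _ hwm
    rw [hget _ hwm]
    by_cases hzc : ((z.1 + m.1, z.2 + m.2) : Int × Int) = ((c, c) : Int × Int)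
    · simp [hzc]
    · simp [hzc]

theorem search_eq_alt (n : Int) (k : Int × Int) (hn : 1 ≤ n) : search n k = search_alt n k := by
  rw [search, search_alt, ← pvMoves_eq k, pvBoardB_eq]
  have hc : 0 ≤ PySem.Int.floordiv (n - 1) 2 ∧ PySem.Int.floordiv (n - 1) 2 < n := by
    rw [PySem.Int.floordiv_eq_ediv_of_pos (by omega)]
    omega
  set c := PySem.Int.floordiv (n - 1) 2 with hcdef
  have hdims0 := pvDims_new n
  have hb0dims : pvDims n (pvSet2 (pvNewBoard n) c c 1) := pvDims_set2 hdims0 c c 1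
  have hZ0 : pvZ (pvSet2 (pvNewBoard n) c c 1) + 1 = n.toNat * n.toNat := by
    rw [pvZ_set2 hdims0 hc.1 hc.2 hc.1 hc.2 (pvGet2_new n c c) one_ne_zero]
    exact pvZ_new n
  have hok : ∀ cc ∈ [((c, c) : Int × Int)], pvOk n (pvSet2 (pvNewBoard n) c c 1) 1 cc := by
    intro cc hcc
    simp only [List.mem_singleton] at hcc
    subst hcc
    exact ⟨hc.1, hc.2, hc.1, hc.2, pvGet2_set2_eq hdims0 hc.1 hc.2 hc.1 hc.2 1⟩
  have hnn : 1 ≤ n.toNat * n.toNat := by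
    have : 1 ≤ n.toNat := by omega
    nlinarith
  have h1 : pvLoopA n (pvAllMoves k) (2 * n.toNat * n.toNat + 1) (pvSet2 (pvNewBoard n) c c 1)
      [((c, c) : Int × Int)]
      = pvLoopL n (pvAllMoves k) (n.toNat * n.toNat) 1 (pvSet2 (pvNewBoard n) c c 1)
      [((c, c) : Int × Int)] :=
    pvMain n (pvAllMoves k) (pvZ (pvSet2 (pvNewBoard n) c c 1))
      (pvSet2 (pvNewBoard n) c c 1) [((c, c) : Int × Int)] 1
      (2 * n.toNat * n.toNat + 1) (n.toNat * n.toNat)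
      le_rfl hb0dims le_rfl hok
      (by
        simp only [List.length_singleton]
        have h22 : 2 * n.toNat * n.toNat = 2 * (n.toNat * n.toNat) := by ring
        omega)
      (by omega)
  have h2 : pvLoopL n (pvAllMoves k) (n.toNat * n.toNat) 1 (pvSet2 (pvNewBoard n) c c 1)
      [((c, c) : Int × Int)]
      = pvLoopJ n (pvAllMoves k) (n.toNat * n.toNat + 1) (pvSet2 (pvNewBoard n) c c 1) :=
    pvLJ n (pvAllMoves k) (pvSym_moves k) (pvZ (pvSet2 (pvNewBoard n) c c 1))
      (pvSet2 (pvNewBoard n) c c 1) [((c, c) : Int × Int)] 1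
      (n.toNat * n.toNat) (n.toNat * n.toNat + 1)
      (pvInv_init n (pvAllMoves k) hc.1 hc.2) le_rfl (by omega) (by omega)
  exact h1.trans h2

-- ===== VERDICT (by name: the statement is the Claim_ definition above) =====
theorem search_spec : Claim_equal_search := by
  intro n k _ hn
  unfold Spec_search
  exact search_eq_alt n k hn
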